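-- pv_equiv track=rewrite | github.com/kimgun95/my-study-log | april_week04/4673_self_number.py | self_number
-- ===== SOURCE A (Python) =====
-- def self_number(number):
--     num = number
--     total = number
--     while num // 10:
--         total += num % 10
--         num = num // 10
--     total += num % 10
--     return total
-- ===== SOURCE B (Python) =====
-- def self_number(number):
--     return number + sum(int(ch) for ch in str(number))
-- ===== Notes on version B (the rewrite author's own statement) =====
-- stated objective: simpler
-- what changed: B computes the digit sum by iterating over the characters of str(number) in a one-line generator expression instead of A's while loop that peels digits with %10 and //10 while maintaining num and total accumulators.
import Mathlib
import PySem

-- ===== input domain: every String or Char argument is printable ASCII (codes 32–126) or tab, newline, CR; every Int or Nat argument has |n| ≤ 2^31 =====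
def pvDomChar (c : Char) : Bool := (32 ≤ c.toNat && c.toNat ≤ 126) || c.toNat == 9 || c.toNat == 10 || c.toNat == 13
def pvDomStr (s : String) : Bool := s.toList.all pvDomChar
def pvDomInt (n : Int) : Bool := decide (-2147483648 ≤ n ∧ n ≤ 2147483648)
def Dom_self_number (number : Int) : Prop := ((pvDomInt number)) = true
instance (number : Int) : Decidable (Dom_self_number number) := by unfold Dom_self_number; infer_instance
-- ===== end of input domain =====

-- B replaces A's %10 / //10 digit-peeling loop by summing the characters of str(number): simpler one-liner.
-- Pre_ excludes negative inputs: there A's while loop never terminates (num // 10 floors toward -1),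
-- and B raises ValueError on the '-' character, so A returns no value on them.


-- ===== PORT A =====
-- the 'while num // 10:' loop; the final 'total += num % 10' after the loop is the else/zero-fuel result.
-- fuel only makes the recursion total: inside Pre_ (number ≥ 0) it never runs out.
def selfLoop : Nat → Int → Int → Int
  | 0, num, total => total + PySem.Int.mod num 10
  | fuel + 1, num, total =>
    if PySem.Int.floordiv num 10 ≠ 0 then
      selfLoop fuel (PySem.Int.floordiv num 10) (total + PySem.Int.mod num 10)
    else
      total + PySem.Int.mod num 10

def self_number (number : Int) : Int :=
  selfLoop (number.natAbs + 1) number number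

-- ===== PORT B =====
-- number + sum(int(ch) for ch in str(number)); int(ch) = PySem.Int.ofStr? on the one-char string
-- (.getD 0 is unreachable inside Pre_: every character of str(number) is then a decimal digit).
def self_number_alt (number : Int) : Int :=
  number + (((PySem.Int.toStr number).toList.map
    (fun ch => (PySem.Int.ofStr? (String.ofList [ch])).getD 0)).sum)

-- ===== PRECONDITION & SPEC =====
-- Pre_ excludes negative numbers: A's while loop never terminates there (num // 10 floors toward -1,
-- so num // 10 is never 0), and B raises ValueError on int('-'); A returns on exactly number ≥ 0.
def Pre_self_number (number : Int) : Prop := 0 ≤ number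
instance (number : Int) : Decidable (Pre_self_number number) := by unfold Pre_self_number; infer_instance
def pvWitness_self_number : Int := (12345)
def Spec_self_number (number : Int) (out : Int) : Prop := out = self_number_alt number
instance (number : Int) (out : Int) : Decidable (Spec_self_number number out) := by unfold Spec_self_number; infer_instance

-- ===== CLAIM (what is proved, stated in full; the proofs are below) =====
def Claim_equal_self_number : Prop := ∀ (number : Int), Dom_self_number number → Pre_self_number number → Spec_self_number number (self_number number)

-- ===== LEMMAS AND PROOFS =====

-- value of a single character under B's int(ch), as an Int
def chVal (ch : Char) : Int := (PySem.Int.ofStr? (String.ofList [ch])).getD 0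

theorem chVal_digitChar {d : Nat} (hd : d < 10) : chVal d.digitChar = (d : Int) := by
  interval_cases d <;> decide

theorem floordiv_natCast (m : Nat) : PySem.Int.floordiv (m : Int) 10 = ((m / 10 : Nat) : Int) := by
  unfold PySem.Int.floordiv
  rw [Int.fdiv_eq_ediv_of_nonneg _ (by omega)]; omega

theorem mod_natCast (m : Nat) : PySem.Int.mod (m : Int) 10 = ((m % 10 : Nat) : Int) := by
  unfold PySem.Int.mod
  rw [Int.fmod_eq_emod_of_nonneg _ (by omega)]; omega

-- the loop adds exactly the decimal digit sum of a nonnegative num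
theorem selfLoop_digits (fuel : Nat) : ∀ (m : Nat), m ≤ fuel → ∀ (total : Int),
    selfLoop fuel (m : Int) total = total + ((Nat.digits 10 m).sum : Int) := by
  induction fuel with
  | zero =>
    intro m hm total
    interval_cases m
    simp [selfLoop]
  | succ f ih =>
    intro m hm total
    rw [selfLoop, floordiv_natCast]
    by_cases h : m / 10 = 0
    · have hm10 : m < 10 := by omega
      rcases Nat.eq_zero_or_pos m with h0 | h0
      · subst h0; simp
      · simp [h, Nat.digits_def' (by norm_num : 1 < 10) h0]
    · have hne : ((m / 10 : Nat) : Int) ≠ 0 := by exact_mod_cast h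
      have hmpos : 0 < m := by omega
      rw [if_pos hne, mod_natCast, ih (m / 10) (by omega) _]
      rw [Nat.digits_def' (by norm_num : 1 < 10) hmpos]
      push_cast [List.map_cons, List.sum_cons]
      ring

-- the character sum of Nat.toDigitsCore equals the digit sum plus the tail's sum
theorem toDigitsCore_sum (fuel : Nat) : ∀ (n : Nat), n < fuel → ∀ (l : List Char),
    ((Nat.toDigitsCore 10 fuel n l).map chVal).sum
      = ((Nat.digits 10 n).sum : Int) + ((l.map chVal).sum) := by
  induction fuel with
  | zero => intro n hn; omega
  | succ f ih =>
    intro n hn l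
    rw [Nat.toDigitsCore]
    by_cases h : n / 10 = 0
    · simp only [h, if_pos]
      rcases Nat.eq_zero_or_pos n with h0 | h0
      · subst h0; simp [chVal_digitChar (by norm_num : (0:Nat) < 10)]
      · have hn10 : n < 10 := by omega
        simp [chVal_digitChar (Nat.mod_lt _ (by norm_num) : n % 10 < 10),
          Nat.digits_def' (by norm_num : 1 < 10) h0, Nat.div_eq_of_lt hn10]
    · simp only [h, ite_false]
      have hlt : n / 10 < f := by
        have := Nat.div_lt_self (by omega : 0 < n) (by norm_num : 1 < 10)
        omega
      rw [ih (n / 10) hlt]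
      have hnpos : 0 < n := by omega
      rw [Nat.digits_def' (by norm_num : 1 < 10) hnpos]
      simp only [List.map_cons, List.sum_cons,
        chVal_digitChar (Nat.mod_lt _ (by norm_num) : n % 10 < 10)]
      push_cast
      ring

theorem alt_digits (m : Nat) :
    self_number_alt (m : Int) = (m : Int) + ((Nat.digits 10 m).sum : Int) := by
  unfold self_number_alt
  have hneg : ¬ ((m : Int) < 0) := by omega
  rw [show ((PySem.Int.toStr (m : Int)).toList) = Nat.toDigits 10 m by
    simp [PySem.Int.toStr, PySem.Int.toChars, hneg]]
  rw [Nat.toDigits]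
  have h := toDigitsCore_sum (m + 1) m (by omega) []
  simp only [List.map_nil, List.sum_nil, add_zero] at h
  rw [show (fun ch => (PySem.Int.ofStr? (String.ofList [ch])).getD 0) = chVal from rfl, h]

-- ===== VERDICT (by name: the statement is the Claim_ definition above) =====
theorem self_number_spec : Claim_equal_self_number := by
  intro number _ hpre
  unfold Spec_self_number
  obtain ⟨m, rfl⟩ : ∃ m : Nat, number = (m : Int) :=
    ⟨number.toNat, (Int.toNat_of_nonneg hpre).symm⟩
  unfold self_number
  rw [Int.natAbs_natCast, selfLoop_digits (m + 1) m (by omega), alt_digits]
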